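-- pv_equiv track=rewrite | github.com/pelouse/Selection-mutation-models | utils.py | find
-- ===== SOURCE A (Python) =====
-- def find(tab):
--     L = len(tab)
--     firstFill = None
--     for k in range(L - 1):
--         if tab[k] != 0 and firstFill is None:
--             firstFill = k
--         if tab[k] != 0 and tab[k] >= tab[k + 1]:
--             return k
--     return firstFill
-- ===== SOURCE B (Python) =====
-- def find(tab):
--     n = len(tab) - 1
--     dec = next((k for k in range(n) if tab[k] != 0 and tab[k] >= tab[k + 1]), None)
--     if dec is not None:
--         return dec
--     return next((k for k in range(n) if tab[k] != 0), None)
-- ===== Notes on version B (the rewrite author's own statement) =====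
-- stated objective: simpler
-- what changed: Replaces the single stateful pass with a firstFill accumulator and early return by two independent scans: first the first index with tab[k]!=0 and tab[k]>=tab[k+1], otherwise the first nonzero index in range(len(tab)-1).
import Mathlib
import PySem

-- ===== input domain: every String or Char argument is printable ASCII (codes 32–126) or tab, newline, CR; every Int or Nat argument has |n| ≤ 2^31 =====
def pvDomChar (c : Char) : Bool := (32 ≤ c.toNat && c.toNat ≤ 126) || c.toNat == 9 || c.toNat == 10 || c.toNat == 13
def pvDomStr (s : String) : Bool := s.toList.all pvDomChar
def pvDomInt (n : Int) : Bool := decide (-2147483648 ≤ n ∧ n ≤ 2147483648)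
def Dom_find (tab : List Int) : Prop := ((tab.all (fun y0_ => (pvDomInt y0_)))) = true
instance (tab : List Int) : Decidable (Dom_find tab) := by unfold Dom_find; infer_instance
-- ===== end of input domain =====

-- B replaces A's single stateful pass (firstFill accumulator + early return) by two independent scans; objective: simpler.


-- ===== PORT A =====
-- A: one pass with a `firstFill` accumulator and an early return.
def findGo (tab : List Int) (n k : Nat) (ff : Option Int) : Option Int :=
  if _h : k < n then
    let ff' := if tab.getD k 0 ≠ 0 ∧ ff = none then some (k : Int) else ff
    if tab.getD k 0 ≠ 0 ∧ tab.getD (k + 1) 0 ≤ tab.getD k 0 then some (k : Int)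
    else findGo tab n (k + 1) ff'
  else ff
termination_by n - k

def find (tab : List Int) : Option Int :=
  findGo tab (tab.length - 1) 0 none

-- ===== PORT B =====
-- B: two independent scans, no accumulator (alternative decomposition).
def find_alt (tab : List Int) : Option Int :=
  match (List.range (tab.length - 1)).find? (fun k => decide (tab.getD k 0 ≠ 0 ∧ tab.getD (k + 1) 0 ≤ tab.getD k 0)) with
  | some d => some (d : Int)
  | none => ((List.range (tab.length - 1)).find? (fun k => tab.getD k 0 != 0)).map (fun k => (k : Int))

-- ===== PRECONDITION & SPEC =====
def Spec_find (tab : List Int) (out : Option Int) : Prop := out = find_alt tab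
instance (tab : List Int) (out : Option Int) : Decidable (Spec_find tab out) := by unfold Spec_find; infer_instance

-- ===== CLAIM (what is proved, stated in full; the proofs are below) =====
def Claim_equal_find : Prop := ∀ (tab : List Int), Dom_find tab → Spec_find tab (find tab)

-- ===== LEMMAS AND PROOFS =====

theorem findGo_eq (tab : List Int) (n : Nat) :
    ∀ (m k : Nat) (ff : Option Int), k + m = n →
    findGo tab n k ff =
      match (List.range' k m).find? (fun j => decide (tab.getD j 0 ≠ 0 ∧ tab.getD (j + 1) 0 ≤ tab.getD j 0)) with
      | some d => some (d : Int)
      | none => ff.or (((List.range' k m).find? (fun j => tab.getD j 0 != 0)).map (fun j => (j : Int))) := by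
  intro m
  induction m with
  | zero =>
    intro k ff hk
    rw [findGo]
    rw [dif_neg (by omega : ¬ k < n)]
    cases ff <;> rfl
  | succ m ih =>
    intro k ff hk
    have hklt : k < n := by omega
    rw [findGo, dif_pos hklt, List.range'_succ]
    by_cases hdec : tab.getD k 0 ≠ 0 ∧ tab.getD (k + 1) 0 ≤ tab.getD k 0
    · rw [if_pos hdec, List.find?_cons_of_pos (by simpa using hdec)]
    · rw [if_neg hdec, List.find?_cons_of_neg (by simpa using hdec)]
      rw [ih (k + 1) _ (by omega)]
      cases hF : (List.range' (k + 1) m).find?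
          (fun j => decide (tab.getD j 0 ≠ 0 ∧ tab.getD (j + 1) 0 ≤ tab.getD j 0)) with
      | some d => rfl
      | none =>
        by_cases hnz : tab.getD k 0 ≠ 0
        · rw [List.find?_cons_of_pos (by simpa using hnz)]
          cases ff with
          | none => rw [if_pos ⟨hnz, rfl⟩]; rfl
          | some a => rw [if_neg (by simp)]; rfl
        · rw [List.find?_cons_of_neg (by simpa using hnz)]
          rw [if_neg (fun h => hnz h.1)]

-- ===== VERDICT (by name: the statement is the Claim_ definition above) =====
theorem find_spec : Claim_equal_find := by
  intro tab _
  unfold Spec_find find find_alt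
  rw [findGo_eq tab (tab.length - 1) (tab.length - 1) 0 none (by omega)]
  rw [← List.range_eq_range']
  cases (List.range (tab.length - 1)).find?
      (fun j => decide (tab.getD j 0 ≠ 0 ∧ tab.getD (j + 1) 0 ≤ tab.getD j 0)) <;> rfl
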